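-- pv_equiv track=rewrite | github.com/Apothor/Codecademy | Code Challenges/24. Semi-Prime Numbers/Semi-Prime Numbers.py | semiPrimeDetector
-- ===== SOURCE A (Python) =====
-- def semiPrimeDetector(n):
--     if n < 4:
--         return False
--     factors = 0
--     for i in range(2, int(n ** 0.5) + 1):
--         y = n
--         while y % i == 0:
--             factors += 1
--             if factors > 2:
--                 return False
--             y //= i
--         if y != n and y > 1:
--             factors += 1
--     return factors == 2
-- ===== SOURCE B (Python) =====
-- def semiPrimeDetector(n):
--     if n < 4:
--         return False
--     m = n
--     count = 0
--     i = 2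
--     while i * i <= m:
--         if m % i == 0:
--             count += 1
--             if count > 2:
--                 return False
--             m //= i
--         else:
--             i += 1
--     if m > 1:
--         count += 1
--     return count == 2
-- ===== Notes on version B (the rewrite author's own statement) =====
-- stated objective: alternative
-- what changed: B counts the prime factors with multiplicity by a single reducing trial division (the candidate divisor climbs while the remaining cofactor shrinks as factors are divided out) and checks that the count is that of a semiprime, instead of A's float-sqrt-bounded scan over every candidate that resets the working value to n at each step and adds a cofactor bump to the tally.
import Mathlib
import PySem

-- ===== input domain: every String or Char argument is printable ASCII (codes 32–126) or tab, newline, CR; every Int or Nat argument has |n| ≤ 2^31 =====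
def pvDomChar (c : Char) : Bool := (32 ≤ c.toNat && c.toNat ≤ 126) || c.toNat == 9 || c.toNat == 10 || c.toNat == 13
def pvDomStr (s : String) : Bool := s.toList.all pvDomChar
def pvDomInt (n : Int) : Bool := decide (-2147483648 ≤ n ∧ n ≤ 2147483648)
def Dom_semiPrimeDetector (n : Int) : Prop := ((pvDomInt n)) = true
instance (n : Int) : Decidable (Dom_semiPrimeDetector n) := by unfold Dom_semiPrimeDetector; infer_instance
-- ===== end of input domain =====

-- B replaces A's sqrt-bounded scan (which resets y = n at every i and adds a cofactor bump) by a
-- single reducing trial division counting prime factors with multiplicity; return value only.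

-- ===== PORT A =====
-- A's inner `while y % i == 0` loop; the fuel only makes the recursion structural (it is never
-- exhausted for the fuel A passes, since the loop runs at most log₂ y + 1 times).
def pvInnerA (i : Int) : Nat → Int → Int → Option (Int × Int)
  | 0, y, factors => some (y, factors)
  | fuel + 1, y, factors =>
    if PySem.Int.mod y i = 0 then
      if factors + 1 > 2 then none
      else pvInnerA i fuel (PySem.Int.floordiv y i) (factors + 1)
    else some (y, factors)

-- A's `for i in range(...)` loop; `none` = the early `return False`.
def pvOuterA (n : Int) : List Int → Int → Option Int
  | [], factors => some factors
  | i :: rest, factors =>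
    match pvInnerA i (n.toNat + 1) n factors with
    | none => none
    | some (y, f) => pvOuterA n rest (if y ≠ n ∧ y > 1 then f + 1 else f)

-- `int(n ** 0.5)` is ported as `Nat.sqrt`: exact on the stated domain 0 ≤ n ≤ 2^31 (the float
-- square root of such n floors to the integer square root).
def semiPrimeDetector (n : Int) : Bool :=
  if n < 4 then false
  else
    match pvOuterA n (PySem.List.pyRange 2 (((Nat.sqrt n.toNat : Nat) : Int) + 1) 1) 0 with
    | none => false
    | some factors => factors == 2

-- ===== PORT B =====
-- B's `while i * i <= m` loop (the nested `while m % i == 0` is the branch that keeps i fixed);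
-- the fuel only makes the recursion structural, never exhausted for the fuel B passes.
def pvLoopB : Nat → Int → Int → Int → Bool
  | 0, _, _, _ => false
  | fuel + 1, i, m, count =>
    if i * i ≤ m then
      if PySem.Int.mod m i = 0 then
        if count + 1 > 2 then false
        else pvLoopB fuel i (PySem.Int.floordiv m i) (count + 1)
      else pvLoopB fuel (i + 1) m count
    else (if m > 1 then count + 1 else count) == 2

def semiPrimeDetector_alt (n : Int) : Bool :=
  if n < 4 then false else pvLoopB (2 * n.toNat) 2 n 0

-- ===== PRECONDITION & SPEC =====
def Spec_semiPrimeDetector (n : Int) (out : Bool) : Prop := out = semiPrimeDetector_alt n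
instance (n : Int) (out : Bool) : Decidable (Spec_semiPrimeDetector n out) := by unfold Spec_semiPrimeDetector; infer_instance

-- ===== CLAIM (what is proved, stated in full; the proofs are below) =====
def Claim_equal_semiPrimeDetector : Prop := ∀ (n : Int), Dom_semiPrimeDetector n → Spec_semiPrimeDetector n (semiPrimeDetector n)

-- ===== LEMMAS AND PROOFS =====

-- Ω(n): number of prime factors counted with multiplicity.
def pvOmega (n : ℕ) : ℕ := (Nat.primeFactorsList n).length

-- multiplicity of i in y (meaningful for 2 ≤ i, 1 ≤ y)
def pvV (i y : ℕ) : ℕ :=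
  if h : 2 ≤ i ∧ 1 ≤ y ∧ i ∣ y then pvV i (y / i) + 1 else 0
termination_by y
decreasing_by exact Nat.div_lt_self (by omega) (by omega)

-- A's per-index contribution: what `factors` grows by during the iteration at index i.
def pvC (n i : ℕ) : ℕ :=
  if i ∣ n then pvV i n + (if i ^ pvV i n = n then 0 else 1) else 0

def pvCInt (n i : Int) : Int := (pvC n.toNat i.toNat : Int)

def pvS (n : Int) (is : List Int) : Int := (is.map (pvCInt n)).sum

theorem pvV_unique (i : ℕ) (hi : 2 ≤ i) :
    ∀ (k z y : ℕ), 1 ≤ y → y = i ^ k * z → ¬ i ∣ z → pvV i y = k := by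
  intro k
  induction k with
  | zero =>
    intro z y hy hyz hnd
    rw [pvV]
    simp only [pow_zero, one_mul] at hyz
    subst hyz
    rw [dif_neg (by tauto)]
  | succ k ih =>
    intro z y hy hyz hnd
    rw [pvV]
    have hzpos : 1 ≤ z := by
      rcases Nat.eq_zero_or_pos z with h | h
      · subst h; simp at hyz; omega
      · exact h
    have hdvd : i ∣ y := ⟨i ^ k * z, by rw [hyz, pow_succ]; ring⟩
    rw [dif_pos ⟨hi, hy, hdvd⟩]
    have hdiv : y / i = i ^ k * z := by
      rw [hyz, pow_succ, show i ^ k * i * z = i * (i ^ k * z) by ring]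
      exact Nat.mul_div_cancel_left _ (by omega)
    rw [ih z (y / i) (by rw [hdiv]; show 0 < _; positivity) hdiv hnd]

theorem pvV_decomp (i y : ℕ) (hi : 2 ≤ i) (hy : 1 ≤ y) :
    ∃ z, 1 ≤ z ∧ y = i ^ pvV i y * z ∧ ¬ i ∣ z := by
  induction y using Nat.strong_induction_on with
  | _ y ih =>
    by_cases hd : i ∣ y
    · have hy2 : 1 ≤ y / i := (Nat.one_le_div_iff (by omega)).2 (Nat.le_of_dvd (by omega) hd)
      obtain ⟨z, hz1, hz2, hz3⟩ := ih (y / i) (Nat.div_lt_self (by omega) (by omega)) hy2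
      refine ⟨z, hz1, ?_, hz3⟩
      have hv : pvV i y = pvV i (y / i) + 1 := by rw [pvV, dif_pos ⟨hi, hy, hd⟩]
      rw [hv, pow_succ]
      calc y = i * (y / i) := (Nat.mul_div_cancel' hd).symm
        _ = i * (i ^ pvV i (y / i) * z) := by rw [← hz2]
        _ = i ^ pvV i (y / i) * i * z := by ring
    · refine ⟨y, hy, ?_, hd⟩
      rw [pvV, dif_neg (by tauto)]
      simp

theorem pvV_pos (i y : ℕ) (hi : 2 ≤ i) (hy : 1 ≤ y) (hd : i ∣ y) : 1 ≤ pvV i y := by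
  rw [pvV, dif_pos ⟨hi, hy, hd⟩]; omega

-- ---- Ω basics ----
theorem pvOmega_one : pvOmega 1 = 0 := by simp [pvOmega]

theorem pvOmega_prime {p : ℕ} (hp : p.Prime) : pvOmega p = 1 := by
  simp [pvOmega, Nat.primeFactorsList_prime hp]

theorem pvOmega_mul {a b : ℕ} (ha : a ≠ 0) (hb : b ≠ 0) :
    pvOmega (a * b) = pvOmega a + pvOmega b := by
  have := (Nat.perm_primeFactorsList_mul ha hb).length_eq
  simpa [pvOmega] using this

theorem pvOmega_pos {m : ℕ} (hm : 2 ≤ m) : 1 ≤ pvOmega m := by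
  have h1 : m.primeFactorsList ≠ [] := (Nat.primeFactorsList_ne_nil m).2 (by omega)
  have h2 : 0 < m.primeFactorsList.length := List.length_pos_iff.2 h1
  simpa [pvOmega] using h2

theorem pow_le_prod_of_forall_le (x : ℕ) :
    ∀ (l : List ℕ), (∀ a ∈ l, x ≤ a) → x ^ l.length ≤ l.prod := by
  intro l
  induction l with
  | nil => simp
  | cons a t ih =>
    intro h
    simp only [List.length_cons, List.prod_cons, pow_succ]
    calc x ^ t.length * x ≤ t.prod * a :=
          Nat.mul_le_mul (ih (fun b hb => h b (List.mem_cons_of_mem a hb))) (h a List.mem_cons_self)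
      _ = a * t.prod := by ring

theorem minFac_pow_omega_le {m : ℕ} (hm : 2 ≤ m) : m.minFac ^ pvOmega m ≤ m := by
  have hne : m ≠ 0 := by omega
  have h := pow_le_prod_of_forall_le m.minFac m.primeFactorsList (fun a ha => by
    have hp : a.Prime := Nat.prime_of_mem_primeFactorsList ha
    exact Nat.minFac_le_of_dvd hp.two_le (Nat.dvd_of_mem_primeFactorsList ha))
  calc m.minFac ^ pvOmega m ≤ m.primeFactorsList.prod := h
    _ = m := Nat.prod_primeFactorsList hne

-- ---- the sum characterisation: Σ_{i=2}^{√m} pvC m i = 2  ↔  Ω m = 2 ----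

theorem pvC_eq_zero {m i : ℕ} (h : ¬ i ∣ m) : pvC m i = 0 := by simp [pvC, h]

theorem dvd_prime_mul {p q i : ℕ} (hp : p.Prime) (hq : q.Prime)
    (h : i ∣ p * q) : i = 1 ∨ i = p ∨ i = q ∨ i = p * q := by
  by_cases hpi : p ∣ i
  · obtain ⟨j, rfl⟩ := hpi
    have hj : j ∣ q := (Nat.mul_dvd_mul_iff_left hp.pos).1 h
    rcases (Nat.dvd_prime hq).1 hj with rfl | rfl
    · right; left; simp
    · right; right; right; rfl
  · have hco : Nat.Coprime p i := (Nat.Prime.coprime_iff_not_dvd hp).2 hpi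
    have hiq : i ∣ q := Nat.Coprime.dvd_of_dvd_mul_left (Nat.Coprime.symm hco) h
    rcases (Nat.dvd_prime hq).1 hiq with rfl | rfl
    · left; rfl
    · right; right; left; rfl

theorem sum_eq_two_of_pq {p q : ℕ} (hp : p.Prime) (hq : q.Prime) (hlt : p < q) :
    (∑ i ∈ Finset.Icc 2 (Nat.sqrt (p * q)), pvC (p * q) i) = 2 := by
  set m := p * q with hm
  have h2p := hp.two_le
  have h2q := hq.two_le
  have hm4 : 4 ≤ m := by calc 4 = 2 * 2 := rfl
                              _ ≤ p * q := Nat.mul_le_mul (by omega) (by omega)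
  have hpmem : p ∈ Finset.Icc 2 (Nat.sqrt m) := by
    rw [Finset.mem_Icc]
    exact ⟨h2p, Nat.le_sqrt.2 (Nat.mul_le_mul_left p (by omega))⟩
  rw [Finset.sum_eq_single_of_mem p hpmem]
  · have hvp : pvV p m = 1 := by
      apply pvV_unique p h2p 1 q m (by omega)
      · simpa using hm
      · intro hdq
        rcases (Nat.dvd_prime hq).1 hdq with h1 | h1
        · exact hp.ne_one h1
        · omega
    have hpd : p ∣ m := ⟨q, rfl⟩
    simp only [pvC, if_pos hpd, hvp, pow_one]
    rw [if_neg (by nlinarith)]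
  · intro i hi hine
    rw [Finset.mem_Icc] at hi
    by_cases hdvd : i ∣ m
    · exfalso
      rcases dvd_prime_mul hp hq hdvd with rfl | rfl | rfl | rfl
      · omega
      · exact hine rfl
      · have := Nat.le_sqrt.1 hi.2
        nlinarith
      · have := Nat.sqrt_lt_self (by omega : 1 < m)
        omega
    · exact pvC_eq_zero hdvd

theorem dvd_prime_sq {p i : ℕ} (hp : p.Prime) (h : i ∣ p * p) :
    i = 1 ∨ i = p ∨ i = p * p := by
  rw [show p * p = p ^ 2 by ring] at h
  obtain ⟨j, hj, rfl⟩ := (Nat.dvd_prime_pow hp).1 h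
  interval_cases j
  · left; rfl
  · right; left; exact pow_one p
  · right; right; ring

theorem sum_eq_two_of_sq {p : ℕ} (hp : p.Prime) :
    (∑ i ∈ Finset.Icc 2 (Nat.sqrt (p * p)), pvC (p * p) i) = 2 := by
  set m := p * p with hm
  have h2 := hp.two_le
  have hm4 : 4 ≤ m := by calc 4 = 2 * 2 := rfl
                              _ ≤ p * p := Nat.mul_le_mul h2 h2
  have hpmem : p ∈ Finset.Icc 2 (Nat.sqrt m) := by
    rw [Finset.mem_Icc]
    exact ⟨h2, Nat.le_sqrt.2 le_rfl⟩
  rw [Finset.sum_eq_single_of_mem p hpmem]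
  · have hvp : pvV p m = 2 := by
      apply pvV_unique p h2 2 1 m (by omega)
      · rw [hm]; ring
      · simpa using hp.one_lt.ne'
    have hpd : p ∣ m := ⟨p, rfl⟩
    simp only [pvC, if_pos hpd, hvp]
    rw [if_pos (by rw [hm]; ring)]
  · intro i hi hine
    rw [Finset.mem_Icc] at hi
    by_cases hdvd : i ∣ m
    · exfalso
      rcases dvd_prime_sq hp hdvd with rfl | rfl | rfl
      · omega
      · exact hine rfl
      · have := Nat.sqrt_lt_self (by omega : 1 < m)
        omega
    · exact pvC_eq_zero hdvd

theorem sum_eq_zero_of_prime {m : ℕ} (hp : m.Prime) :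
    (∑ i ∈ Finset.Icc 2 (Nat.sqrt m), pvC m i) = 0 := by
  apply Finset.sum_eq_zero
  intro i hi
  rw [Finset.mem_Icc] at hi
  apply pvC_eq_zero
  intro hdvd
  rcases (Nat.dvd_prime hp).1 hdvd with rfl | rfl
  · omega
  · have := Nat.sqrt_lt_self hp.one_lt
    omega

theorem three_le_sum_of_omega {m : ℕ} (hm : 4 ≤ m) (hΩ : 3 ≤ pvOmega m) :
    3 ≤ ∑ i ∈ Finset.Icc 2 (Nat.sqrt m), pvC m i := by
  set p := m.minFac with hpdef
  have hp : p.Prime := Nat.minFac_prime (by omega)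
  have hpd : p ∣ m := Nat.minFac_dvd m
  have h2 := hp.two_le
  have hppow : p ^ 3 ≤ m := by
    calc p ^ 3 ≤ p ^ pvOmega m := Nat.pow_le_pow_right (by omega) hΩ
      _ ≤ m := minFac_pow_omega_le (by omega)
  have hpmem : p ∈ Finset.Icc 2 (Nat.sqrt m) := by
    rw [Finset.mem_Icc]
    refine ⟨h2, Nat.le_sqrt.2 ?_⟩
    calc p * p ≤ p * p * p := Nat.le_mul_of_pos_right _ (by omega)
      _ = p ^ 3 := by ring
      _ ≤ m := hppow
  obtain ⟨z, hz1, hz2, hz3⟩ := pvV_decomp p m h2 (by omega)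
  have hvpos : 1 ≤ pvV p m := pvV_pos p m h2 (by omega) hpd
  rcases Nat.lt_or_ge (pvV p m) 3 with h3 | h3
  swap
  · calc (3:ℕ) ≤ pvC m p := by simp only [pvC, if_pos hpd]; omega
      _ ≤ ∑ i ∈ Finset.Icc 2 (Nat.sqrt m), pvC m i :=
          Finset.single_le_sum (fun i _ => Nat.zero_le _) hpmem
  · have hv12 : pvV p m = 1 ∨ pvV p m = 2 := by omega
    rcases hv12 with hv | hv
    · -- v = 1 : find a second prime index q
      rw [hv, pow_one] at hz2
      have hΩz : 2 ≤ pvOmega z := by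
        have hsplit : pvOmega m = 1 + pvOmega z := by
          rw [hz2, pvOmega_mul (by omega) (by omega), pvOmega_prime hp]
        omega
      have hz2le : 2 ≤ z := by
        by_contra h
        have hz1' : z = 1 := by omega
        rw [hz1', pvOmega_one] at hΩz; omega
      set q := z.minFac with hq
      have hqp : q.Prime := Nat.minFac_prime (by omega)
      have hqz : q ∣ z := Nat.minFac_dvd z
      have hzm : z ∣ m := ⟨p, by rw [hz2]; ring⟩
      have hqm : q ∣ m := hqz.trans hzm
      have hqne : q ≠ p := fun h => hz3 (h ▸ hqz)
      have hzlem : z ≤ m := Nat.le_of_dvd (by omega) hzm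
      have hqmem : q ∈ Finset.Icc 2 (Nat.sqrt m) := by
        rw [Finset.mem_Icc]
        refine ⟨hqp.two_le, Nat.le_sqrt.2 ?_⟩
        calc q * q = q ^ 2 := by ring
          _ ≤ q ^ pvOmega z := Nat.pow_le_pow_right (by have := hqp.two_le; omega) hΩz
          _ ≤ z := minFac_pow_omega_le hz2le
          _ ≤ m := hzlem
      have hsub : ({p, q} : Finset ℕ) ⊆ Finset.Icc 2 (Nat.sqrt m) := by
        intro x hx
        simp only [Finset.mem_insert, Finset.mem_singleton] at hx
        rcases hx with rfl | rfl
        · exact hpmem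
        · exact hqmem
      have hsum : pvC m p + pvC m q ≤ ∑ i ∈ Finset.Icc 2 (Nat.sqrt m), pvC m i := by
        calc pvC m p + pvC m q = ∑ i ∈ ({p, q} : Finset ℕ), pvC m i :=
              (Finset.sum_pair (fun h => hqne h.symm)).symm
          _ ≤ _ := Finset.sum_le_sum_of_subset hsub
      have hcp : pvC m p = 2 := by
        have hpm : p ^ pvV p m ≠ m := by
          rw [hv, pow_one]
          intro h
          have : pvOmega m = 1 := by rw [← h, pvOmega_prime hp]
          omega
        simp only [pvC, if_pos hpd, hv]
        rw [if_neg (hv ▸ hpm)]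
      have hcq : 1 ≤ pvC m q := by
        simp only [pvC, if_pos hqm]
        have := pvV_pos q m hqp.two_le (by omega) hqm
        omega
      omega
    · -- v = 2
      have hpm : p ^ pvV p m ≠ m := by
        rw [hv, pow_two]
        intro h
        have : pvOmega m = 2 := by
          rw [← h, pvOmega_mul (by omega) (by omega), pvOmega_prime hp]
        omega
      have hcp : pvC m p = 3 := by
        simp only [pvC, if_pos hpd, hv]
        rw [if_neg (hv ▸ hpm)]
      calc (3:ℕ) = pvC m p := hcp.symm
        _ ≤ _ := Finset.single_le_sum (fun i _ => Nat.zero_le _) hpmem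

theorem omega_two_decomp {m : ℕ} (hm : pvOmega m = 2) :
    ∃ p q, p.Prime ∧ q.Prime ∧ m = p * q := by
  have hm0 : m ≠ 0 := by
    intro h; rw [h] at hm; simp [pvOmega] at hm
  have hprod := Nat.prod_primeFactorsList hm0
  have hlen : m.primeFactorsList.length = 2 := hm
  match hl : m.primeFactorsList with
  | [p, q] =>
    refine ⟨p, q, ?_, ?_, ?_⟩
    · exact Nat.prime_of_mem_primeFactorsList (hl ▸ (by simp) : p ∈ m.primeFactorsList)
    · exact Nat.prime_of_mem_primeFactorsList (hl ▸ (by simp) : q ∈ m.primeFactorsList)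
    · rw [hl] at hprod
      simp only [List.prod_cons, List.prod_nil, mul_one] at hprod
      exact hprod.symm
  | [] => rw [hl] at hlen; simp at hlen
  | [p] => rw [hl] at hlen; simp at hlen
  | p :: q :: r :: t => rw [hl] at hlen; simp at hlen

theorem omega_one_prime {m : ℕ} (hm1 : 1 ≤ m) (hm : pvOmega m = 1) : m.Prime := by
  have hm0 : m ≠ 0 := by omega
  have hprod := Nat.prod_primeFactorsList hm0
  have hlen : m.primeFactorsList.length = 1 := hm
  match hl : m.primeFactorsList with
  | [p] =>
    have hp : p.Prime := Nat.prime_of_mem_primeFactorsList (hl ▸ (by simp) : p ∈ m.primeFactorsList)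
    rw [hl] at hprod
    simp only [List.prod_cons, List.prod_nil, mul_one] at hprod
    exact hprod ▸ hp
  | [] => rw [hl] at hlen; simp at hlen
  | p :: q :: t => rw [hl] at hlen; simp at hlen

theorem sum_iff_omega {m : ℕ} (hm : 4 ≤ m) :
    ((∑ i ∈ Finset.Icc 2 (Nat.sqrt m), pvC m i) = 2 ↔ pvOmega m = 2) := by
  constructor
  · intro hS
    by_contra hΩ
    have h1 : 1 ≤ pvOmega m := pvOmega_pos (by omega)
    rcases Nat.lt_or_ge (pvOmega m) 3 with h3 | h3
    · have hΩ1 : pvOmega m = 1 := by omega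
      have hp := omega_one_prime (by omega) hΩ1
      rw [sum_eq_zero_of_prime hp] at hS
      omega
    · have := three_le_sum_of_omega hm h3
      omega
  · intro hΩ
    obtain ⟨p, q, hp, hq, rfl⟩ := omega_two_decomp hΩ
    rcases Nat.lt_trichotomy p q with h | h | h
    · exact sum_eq_two_of_pq hp hq h
    · subst h; exact sum_eq_two_of_sq hp
    · rw [Nat.mul_comm]; exact sum_eq_two_of_pq hq hp h

-- ---- A's loop computes the sum ----

theorem innerA_eq (i : Int) (hi : 2 ≤ i) :
    ∀ (k : ℕ) (fuel : ℕ) (z f : Int), 1 ≤ z → ¬ i ∣ z → k < fuel →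
      pvInnerA i fuel (i ^ k * z) f =
        if 1 ≤ k ∧ f + (k : Int) > 2 then none else some (z, f + (k : Int)) := by
  intro k
  induction k with
  | zero =>
    intro fuel z f hz hnd hfuel
    match fuel with
    | fuel + 1 =>
      simp only [pow_zero, one_mul, pvInnerA]
      rw [if_neg (fun h => hnd ((PySem.Int.mod_eq_zero_iff_dvd _ _).1 h))]
      simp
  | succ k ih =>
    intro fuel z f hz hnd hfuel
    match fuel with
    | fuel + 1 =>
      have hiz : i ∣ i ^ (k + 1) * z := ⟨i ^ k * z, by ring⟩
      simp only [pvInnerA]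
      rw [if_pos ((PySem.Int.mod_eq_zero_iff_dvd _ _).2 hiz)]
      by_cases hf : f + 1 > 2
      · rw [if_pos hf]
        have hc : 1 ≤ k + 1 ∧ f + ((k + 1 : ℕ) : Int) > 2 := ⟨by omega, by push_cast; omega⟩
        rw [if_pos hc]
      · rw [if_neg hf]
        have hfd : PySem.Int.floordiv (i ^ (k + 1) * z) i = i ^ k * z := by
          rw [PySem.Int.floordiv_eq_ediv_of_pos (by omega),
              show i ^ (k + 1) * z = i * (i ^ k * z) by ring]
          exact Int.mul_ediv_cancel_left _ (by omega)
        rw [hfd, ih fuel z (f + 1) hz hnd (by omega)]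
        split_ifs with h1 h2 h2
        · rfl
        · exfalso
          obtain ⟨h1a, h1b⟩ := h1
          exact h2 ⟨by omega, by push_cast at h1b ⊢; omega⟩
        · exfalso
          obtain ⟨h2a, h2b⟩ := h2
          push_cast at h2b
          rcases Nat.eq_zero_or_pos k with hk0 | hk1
          · subst hk0; omega
          · exact h1 ⟨hk1, by omega⟩
        · simp only [Option.some.injEq, Prod.mk.injEq]
          refine ⟨by simp, by push_cast; ring⟩

theorem pvCInt_nonneg (n i : Int) : 0 ≤ pvCInt n i := by
  simp [pvCInt]

theorem pvS_nonneg (n : Int) (is : List Int) : 0 ≤ pvS n is := by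
  induction is with
  | nil => simp [pvS]
  | cons a t ih =>
    simp only [pvS, List.map_cons, List.sum_cons] at *
    have := pvCInt_nonneg n a
    omega

theorem outerA_eq (n : Int) (hn : 4 ≤ n) :
    ∀ (is : List Int) (f : Int), (∀ i ∈ is, 2 ≤ i) →
      (pvOuterA n is f = none → 3 ≤ f + pvS n is) ∧
      (∀ g, pvOuterA n is f = some g → g = f + pvS n is) := by
  intro is
  induction is with
  | nil =>
    intro f _
    constructor
    · intro h; simp [pvOuterA] at h
    · intro g h
      simp only [pvOuterA, Option.some.injEq] at h
      simp [pvS, ← h]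
  | cons i rest ih =>
    intro f hmem
    have hi : 2 ≤ i := hmem i List.mem_cons_self
    have hiN : 2 ≤ i.toNat := by omega
    have hnN : 1 ≤ n.toNat := by omega
    obtain ⟨zN, hz1, hz2, hz3⟩ := pvV_decomp i.toNat n.toNat hiN hnN
    set k := pvV i.toNat n.toNat with hk
    have hcastI : ((i.toNat : ℕ) : Int) = i := Int.toNat_of_nonneg (by omega)
    have hcastN : ((n.toNat : ℕ) : Int) = n := Int.toNat_of_nonneg (by omega)
    have hdec : n = i ^ k * (zN : Int) := by
      rw [← hcastN, ← hcastI]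
      exact_mod_cast congrArg (Nat.cast : ℕ → Int) hz2
    have hndz : ¬ i ∣ (zN : Int) := by
      rw [← hcastI]
      intro h
      exact hz3 (Int.natCast_dvd_natCast.1 h)
    have hzpos : (1 : Int) ≤ (zN : Int) := by exact_mod_cast hz1
    have hkfuel : k < n.toNat + 1 := by
      have h1 : 2 ^ k ≤ i.toNat ^ k * zN :=
        Nat.le_trans (Nat.pow_le_pow_left hiN k) (Nat.le_mul_of_pos_right _ (by omega))
      have h2 : k < 2 ^ k := Nat.lt_two_pow_self
      omega
    have hinner := innerA_eq i hi k (n.toNat + 1) (zN : Int) f hzpos hndz hkfuel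
    rw [← hdec] at hinner
    have hSsplit : pvS n (i :: rest) = pvCInt n i + pvS n rest := by
      simp [pvS]
    by_cases hcond : 1 ≤ k ∧ f + (k : Int) > 2
    · rw [if_pos hcond] at hinner
      constructor
      · intro _
        have hSrest := pvS_nonneg n rest
        have hdvd : i.toNat ∣ n.toNat := by
          rw [hz2]
          exact dvd_mul_of_dvd_left (dvd_pow_self _ (by omega)) zN
        have hC : (k : Int) ≤ pvCInt n i := by
          simp only [pvCInt, pvC, if_pos hdvd, ← hk]
          split_ifs <;> push_cast <;> omega
        rw [hSsplit]
        omega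
      · intro g hg
        rw [pvOuterA, hinner] at hg
        exact absurd hg (by simp)
    · rw [if_neg hcond] at hinner
      rcases Nat.eq_zero_or_pos k with hk0 | hkpos
      · -- i does not divide n: no change to factors
        have hzn : (zN : Int) = n := by rw [hdec, hk0]; simp
        have hci : pvCInt n i = 0 := by
          have hnd : ¬ i.toNat ∣ n.toNat := by
            intro hd
            have := pvV_pos i.toNat n.toNat hiN hnN hd
            omega
          simp [pvCInt, pvC_eq_zero hnd]
        have hstep : pvOuterA n (i :: rest) f = pvOuterA n rest f := by
          simp only [pvOuterA, hinner]
          rw [if_neg (by rw [hzn]; simp), hk0]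
          norm_num
        obtain ⟨ih1, ih2⟩ := ih f (fun j hj => hmem j (List.mem_cons_of_mem i hj))
        constructor
        · intro h
          rw [hstep] at h
          have := ih1 h
          rw [hSsplit, hci]
          omega
        · intro g hg
          rw [hstep] at hg
          rw [hSsplit, hci]
          have := ih2 g hg
          omega
      · -- i divides n: factors grows by pvC n i
        have hdvd : i.toNat ∣ n.toNat := by
          rw [hz2]
          exact dvd_mul_of_dvd_left (dvd_pow_self _ (by omega)) zN
        have hik2 : (2:Int) ≤ i ^ k := by
          calc (2:Int) ≤ i := hi
            _ = i ^ 1 := (pow_one i).symm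
            _ ≤ i ^ k := pow_le_pow_right₀ (by omega) (by omega)
        have hzn : (zN : Int) ≠ n := by
          intro h
          rw [h] at hdec
          nlinarith
        have hbump : (if (zN : Int) ≠ n ∧ (zN : Int) > 1 then f + (k:Int) + 1 else f + (k:Int))
            = f + pvCInt n i := by
          have hcval : pvCInt n i = (k : Int) + (if i.toNat ^ k = n.toNat then 0 else 1) := by
            simp only [pvCInt, pvC, if_pos hdvd, ← hk]
            split_ifs <;> push_cast <;> ring
          by_cases hz2' : (zN : Int) > 1
          · rw [if_pos ⟨hzn, hz2'⟩, hcval, if_neg]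
            · ring
            · intro h
              have hik : (i:Int) ^ k = n := by
                rw [← hcastN, ← h]
                push_cast
                rw [hcastI]
              rw [hik] at hdec
              nlinarith
          · rw [if_neg (by tauto), hcval, if_pos]
            · ring
            · have hz1' : (zN : Int) = 1 := by omega
              have : (i:Int) ^ k = n := by rw [hdec, hz1', mul_one]
              have : ((i.toNat ^ k : ℕ) : Int) = ((n.toNat : ℕ) : Int) := by
                push_cast
                rw [hcastI, hcastN]
                exact this
              exact_mod_cast this
        have hstep : pvOuterA n (i :: rest) f = pvOuterA n rest (f + pvCInt n i) := by
          simp only [pvOuterA, hinner]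
          rw [hbump]
        obtain ⟨ih1, ih2⟩ := ih (f + pvCInt n i) (fun j hj => hmem j (List.mem_cons_of_mem i hj))
        constructor
        · intro h
          rw [hstep] at h
          have := ih1 h
          rw [hSsplit]
          omega
        · intro g hg
          rw [hstep] at hg
          have := ih2 g hg
          rw [hSsplit]
          omega

theorem pvS_eq_sum (n : Int) (R : ℕ) :
    pvS n (PySem.List.pyRange 2 ((R : Int) + 1) 1) = ((∑ i ∈ Finset.Icc 2 R, pvC n.toNat i : ℕ) : Int) := by
  induction R with
  | zero =>
    rw [PySem.List.pyRange_one_eq_nil (by norm_num)]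
    simp [pvS]
  | succ R ih =>
    rcases Nat.eq_zero_or_pos R with rfl | hR
    · rw [PySem.List.pyRange_one_eq_nil (by norm_num)]
      simp [pvS]
    · have hsplit : PySem.List.pyRange 2 ((R : Int) + 1 + 1) 1
          = PySem.List.pyRange 2 ((R : Int) + 1) 1 ++ [(R : Int) + 1] := by
        exact PySem.List.pyRange_one_succ_right (by omega)
      push_cast
      rw [hsplit]
      have hS : pvS n (PySem.List.pyRange 2 ((R : Int) + 1) 1 ++ [(R : Int) + 1])
          = pvS n (PySem.List.pyRange 2 ((R : Int) + 1) 1) + pvCInt n ((R : Int) + 1) := by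
        simp [pvS]
      rw [hS, ih, Finset.sum_Icc_succ_top (by omega : 2 ≤ R + 1)]
      have harg : ((R : Int) + 1).toNat = R + 1 := by omega
      have : pvCInt n ((R : Int) + 1) = (pvC n.toNat (R + 1) : Int) := by
        simp only [pvCInt, harg]
      rw [this]
      push_cast
      ring

theorem pvBeqInt (a b : Int) : (a == b) = decide (a = b) := by
  by_cases h : a = b
  · simp [h]
  · simp [h]

theorem A_char (n : Int) (hn : 4 ≤ n) :
    semiPrimeDetector n = decide ((∑ i ∈ Finset.Icc 2 (Nat.sqrt n.toNat), pvC n.toNat i) = 2) := by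
  rw [semiPrimeDetector, if_neg (by omega)]
  have hmem : ∀ i ∈ PySem.List.pyRange 2 (((Nat.sqrt n.toNat : ℕ) : Int) + 1) 1, (2:Int) ≤ i := by
    intro i hi
    exact ((PySem.List.mem_pyRange_one).1 hi).1
  obtain ⟨h1, h2⟩ := outerA_eq n hn (PySem.List.pyRange 2 (((Nat.sqrt n.toNat : ℕ) : Int) + 1) 1) 0 hmem
  have hSeq := pvS_eq_sum n (Nat.sqrt n.toNat)
  cases houter : pvOuterA n (PySem.List.pyRange 2 (((Nat.sqrt n.toNat : ℕ) : Int) + 1) 1) 0 with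
  | none =>
    have h3 := h1 houter
    rw [hSeq] at h3
    have : ¬ ((∑ i ∈ Finset.Icc 2 (Nat.sqrt n.toNat), pvC n.toNat i) = 2) := by
      intro h
      rw [h] at h3
      norm_num at h3
    simp [this]
  | some g =>
    have hg := h2 g houter
    rw [hSeq] at hg
    simp only [zero_add] at hg
    subst hg
    show ((((∑ i ∈ Finset.Icc 2 (Nat.sqrt n.toNat), pvC n.toNat i : ℕ)) : Int) == 2)
        = decide ((∑ i ∈ Finset.Icc 2 (Nat.sqrt n.toNat), pvC n.toNat i) = 2)
    rw [pvBeqInt]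
    exact decide_eq_decide.2 ⟨fun h => by exact_mod_cast h, fun h => by exact_mod_cast h⟩

-- ---- B's loop computes Ω ----

theorem loopB_eq :
    ∀ (fuel : ℕ) (i m c : Int), 2 ≤ i → 1 ≤ m →
      2 * m - i + 1 ≤ (fuel : Int) → 1 ≤ fuel →
      (∀ p : ℕ, p.Prime → (p : Int) < i → ¬ (p : Int) ∣ m) →
      pvLoopB fuel i m c = decide (c + (pvOmega m.toNat : Int) = 2) := by
  intro fuel
  induction fuel with
  | zero => intro i m c _ _ _ hf _; omega
  | succ fuel ih =>
    intro i m c hi hm hfuel _ hprimes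
    simp only [pvLoopB]
    by_cases hloop : i * i ≤ m
    · rw [if_pos hloop]
      have him : i ≤ m := le_trans (by nlinarith) hloop
      by_cases hdvd : i ∣ m
      · rw [if_pos ((PySem.Int.mod_eq_zero_iff_dvd _ _).2 hdvd)]
        -- i is prime (as a natural number)
        have hiN : 2 ≤ i.toNat := by omega
        have hcastI : ((i.toNat : ℕ) : Int) = i := Int.toNat_of_nonneg (by omega)
        have hip : i.toNat.Prime := by
          by_contra hnp
          set p0 := i.toNat.minFac with hp0
          have hp0p : p0.Prime := Nat.minFac_prime (by omega)
          have hp0i : p0 ∣ i.toNat := Nat.minFac_dvd _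
          have hp0m : (p0 : Int) ∣ m := by
            have h1 : (p0 : Int) ∣ i := by
              rw [← hcastI]; exact_mod_cast Int.natCast_dvd_natCast.2 hp0i
            exact h1.trans hdvd
          have hnotlt := hprimes p0 hp0p
          have hge : i ≤ (p0 : Int) := by
            by_contra hlt
            exact hnotlt (by omega) hp0m
          have hle : p0 ≤ i.toNat := Nat.minFac_le (by omega)
          have : p0 = i.toNat := by omega
          rw [this] at hp0p
          exact hnp hp0p
        -- m = i * (m / i) and Ω m = 1 + Ω (m / i)
        set m' := m / i with hm'
        have hmm' : m = i * m' := (Int.ediv_mul_cancel hdvd).symm.trans (by ring)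
        have hm'pos : 1 ≤ m' := by
          rcases hdvd with ⟨w, hw⟩
          have : m' = w := by rw [hm', hw]; exact Int.mul_ediv_cancel_left _ (by omega)
          rw [this]
          nlinarith
        have hm'i : i ≤ m' := by nlinarith [hmm' ▸ hloop]
        have hsplitN : m.toNat = i.toNat * m'.toNat := by
          have : (m.toNat : Int) = ((i.toNat * m'.toNat : ℕ) : Int) := by
            push_cast
            rw [hcastI, Int.toNat_of_nonneg (by omega), Int.toNat_of_nonneg (by omega)]
            exact hmm'
          exact_mod_cast this
        have hΩ : pvOmega m.toNat = 1 + pvOmega m'.toNat := by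
          rw [hsplitN, pvOmega_mul (by omega) (by omega), pvOmega_prime hip]
        have hΩpos : 1 ≤ pvOmega m.toNat := pvOmega_pos (by omega)
        by_cases hc : c + 1 > 2
        · rw [if_pos hc]
          have : ¬ (c + (pvOmega m.toNat : Int) = 2) := by omega
          simp [this]
        · rw [if_neg hc]
          have hfd : PySem.Int.floordiv m i = m' := PySem.Int.floordiv_eq_ediv_of_pos (by omega)
          rw [hfd]
          rw [ih i m' (c + 1) hi hm'pos ?_ ?_ ?_]
          · exact decide_eq_decide.2 (by rw [hΩ]; push_cast; omega)
          · have : 2 * m' ≤ m := by nlinarith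
            omega
          · have : 2 * m' - i + 1 ≥ i + 1 := by nlinarith
            omega
          · intro p hp hpi hpm'
            exact hprimes p hp hpi (hpm'.trans ⟨i, by rw [hmm']; ring⟩)
      · rw [if_neg (fun h => hdvd ((PySem.Int.mod_eq_zero_iff_dvd _ _).1 h))]
        rw [ih (i + 1) m c (by omega) hm (by omega) ?_ ?_]
        · have : 2 * m - i ≥ m := by omega
          omega
        · intro p hp hpi hpm
          rcases lt_or_eq_of_le (by omega : (p:Int) ≤ i) with h | h
          · exact hprimes p hp h hpm
          · rw [h] at hpm
            exact hdvd hpm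
    · rw [if_neg hloop]
      by_cases hm1 : m > 1
      · rw [if_pos hm1]
        -- m is prime
        have hmN : 2 ≤ m.toNat := by omega
        have hcastM : ((m.toNat : ℕ) : Int) = m := Int.toNat_of_nonneg (by omega)
        have hmp : m.toNat.Prime := by
          by_contra hnp
          set q := m.toNat.minFac with hq
          have hqp : q.Prime := Nat.minFac_prime (by omega)
          have hqm : q ∣ m.toNat := Nat.minFac_dvd _
          have hqmI : (q : Int) ∣ m := by
            rw [← hcastM]; exact_mod_cast Int.natCast_dvd_natCast.2 hqm
          have hge : i ≤ (q : Int) := by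
            by_contra hlt
            exact hprimes q hqp (by omega) hqmI
          have hsq : q ^ 2 ≤ m.toNat := Nat.minFac_sq_le_self (by omega) hnp
          have : (q : Int) ^ 2 ≤ m := by
            rw [← hcastM]; exact_mod_cast hsq
          nlinarith
        rw [pvOmega_prime hmp, pvBeqInt]
        exact decide_eq_decide.2 (by push_cast; omega)
      · rw [if_neg hm1]
        have : m = 1 := by omega
        subst this
        simp only [Int.toNat_one, pvOmega_one, Nat.cast_zero, add_zero]
        exact pvBeqInt c 2

theorem B_char (n : Int) (hn : 4 ≤ n) :
    semiPrimeDetector_alt n = decide (pvOmega n.toNat = 2) := by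
  rw [semiPrimeDetector_alt, if_neg (by omega)]
  have hcast : ((n.toNat : ℕ) : Int) = n := Int.toNat_of_nonneg (by omega)
  rw [loopB_eq (2 * n.toNat) 2 n 0 (by omega) (by omega) ?_ ?_ ?_]
  · exact decide_eq_decide.2 (by omega)
  · push_cast
    omega
  · omega
  · intro p hp hpi _
    have := hp.two_le
    have : (2:Int) ≤ (p : Int) := by exact_mod_cast this
    omega

-- ===== VERDICT (by name: the statement is the Claim_ definition above) =====
theorem semiPrimeDetector_spec : Claim_equal_semiPrimeDetector := by
  intro n _
  unfold Spec_semiPrimeDetector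
  by_cases hn : n < 4
  · rw [semiPrimeDetector, semiPrimeDetector_alt, if_pos hn, if_pos hn]
  · have hn4 : 4 ≤ n := by omega
    rw [A_char n hn4, B_char n hn4]
    have hmN : 4 ≤ n.toNat := by omega
    exact decide_eq_decide.2 (sum_iff_omega hmN)
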